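-- pv_equiv track=rewrite | github.com/kimSooHyun950921/algoritm | soohyun/python/baekjoon/0429/21608_상어초등학교/refactor.py | find_seats
-- ===== SOURCE A (Python) =====
-- DR = [-1, 1, 0, 0]
--
-- DC = [0, 0, -1, 1]
--
-- def is_in_boundary(arow, acol, N):
--     if arow >= 0 and arow < N:
--         if acol >= 0 and acol < N:
--             return True
--     return False
--
-- def find_seats(maps, N, student, seats):
--     prefer_seat = list()
--     prefer = seats[student]
--     max_prefer_student = 0
--     for row in range(N):
--         for col in range(N):
--             if maps[row][col] != 0:
--                 continue
--             count_prefer_student = 0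
--             for dr, dc in zip(DR, DC):
--                 # 인접 학생 찾기
--                 arow = row + dr
--                 acol = col + dc
--                 if is_in_boundary(arow, acol, N):
--                     if prefer.get(maps[arow][acol], False):
--                         count_prefer_student += 1
--             if max_prefer_student == count_prefer_student:
--                 prefer_seat.append((row, col))
--             elif max_prefer_student < count_prefer_student:
--                 del prefer_seat
--                 prefer_seat = [(row, col)]
--                 max_prefer_student = count_prefer_student
--     return prefer_seat
-- ===== SOURCE B (Python) =====
-- DR = [-1, 1, 0, 0]
--
-- DC = [0, 0, -1, 1]
--
-- def find_seats(maps, N, student, seats):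
--     prefer = seats[student]
--     # Scatter phase: instead of counting preferred neighbours per empty seat,
--     # walk over every seat whose occupant is preferred and push +1 onto each
--     # adjacent empty seat's counter.
--     counts = {}
--     for row in range(N):
--         for col in range(N):
--             if prefer.get(maps[row][col], False):
--                 for dr, dc in zip(DR, DC):
--                     arow = row + dr
--                     acol = col + dc
--                     if 0 <= arow < N and 0 <= acol < N and maps[arow][acol] == 0:
--                         counts[(arow, acol)] = counts.get((arow, acol), 0) + 1
--     # Select phase: row-major list of empty seats, pick those with the best count.
--     empties = [(row, col) for row in range(N) for col in range(N) if maps[row][col] == 0]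
--     best = 0
--     for pos in empties:
--         if counts.get(pos, 0) > best:
--             best = counts.get(pos, 0)
--     return [pos for pos in empties if counts.get(pos, 0) == best]
-- ===== Notes on version B (the rewrite author's own statement) =====
-- stated objective: alternative
-- what changed: A gathers: for each empty seat it scans the four neighbours and counts preferred occupants while keeping a running max with candidate-list resets; B scatters: it walks over seats whose occupant is preferred and increments a per-seat counter dict of each adjacent empty seat, then selects the empty seats (row-major) whose counter equals the best count.
import Mathlib
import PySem

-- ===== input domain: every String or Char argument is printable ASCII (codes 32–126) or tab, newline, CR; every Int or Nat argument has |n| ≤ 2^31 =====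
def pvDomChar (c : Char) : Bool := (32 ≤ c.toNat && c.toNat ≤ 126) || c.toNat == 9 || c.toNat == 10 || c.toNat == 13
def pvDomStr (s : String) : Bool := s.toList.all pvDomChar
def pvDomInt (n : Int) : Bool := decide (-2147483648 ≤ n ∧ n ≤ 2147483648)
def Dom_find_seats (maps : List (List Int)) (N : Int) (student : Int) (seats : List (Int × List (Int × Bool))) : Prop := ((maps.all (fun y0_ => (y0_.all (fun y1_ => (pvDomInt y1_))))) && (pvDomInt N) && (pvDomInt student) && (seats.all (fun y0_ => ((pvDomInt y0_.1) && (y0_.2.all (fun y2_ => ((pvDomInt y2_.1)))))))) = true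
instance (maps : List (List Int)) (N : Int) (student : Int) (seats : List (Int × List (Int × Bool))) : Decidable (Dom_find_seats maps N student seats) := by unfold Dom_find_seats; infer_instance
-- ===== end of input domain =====

-- B replaces A's gather scan (count preferred neighbours per empty seat, with a running
-- max and candidate-list resets) by a scatter algorithm: it walks over the seats whose
-- occupant is preferred and pushes +1 onto a per-seat counter dict of each adjacent empty
-- seat, then selects the empty seats (row-major) whose counter equals the best count.
-- Objective: alternative algorithm, same asymptotic cost.

-- ===== PORT A =====
def pvDR : List Int := [-1, 1, 0, 0]
def pvDC : List Int := [0, 0, -1, 1]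

def is_in_boundary (arow acol N : Int) : Bool :=
  if arow ≥ 0 ∧ arow < N then
    (if acol ≥ 0 ∧ acol < N then true else false)
  else false

-- maps[r][c]; inside Pre_ both indices are in range, so the defaults are never used
def pvGet2 (maps : List (List Int)) (r c : Int) : Int :=
  (PySem.List.pyGet? ((PySem.List.pyGet? maps r).getD []) c).getD 0

-- A's inner `for dr, dc in zip(DR, DC)` counting loop
def pvCount (maps : List (List Int)) (N : Int) (prefer : List (Int × Bool)) (row col : Int) : Int :=
  (List.zip pvDR pvDC).foldl (fun cnt d =>
    let arow := row + d.1
    let acol := col + d.2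
    if is_in_boundary arow acol N then
      (if (PySem.Dict.mk prefer).getD (pvGet2 maps arow acol) false then cnt + 1 else cnt)
    else cnt) 0

def find_seats (maps : List (List Int)) (N : Int) (student : Int) (seats : List (Int × List (Int × Bool))) : List (Int × Int) :=
  let prefer := ((PySem.Dict.mk seats).get? student).getD []
  (((PySem.List.pyRange 0 N 1).foldl (fun (s : List (Int × Int) × Int) row =>
      (PySem.List.pyRange 0 N 1).foldl (fun (s : List (Int × Int) × Int) col =>
        if pvGet2 maps row col ≠ 0 then s
        else
          let c := pvCount maps N prefer row col
          if s.2 = c then (s.1 ++ [(row, col)], s.2)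
          else if s.2 < c then ([(row, col)], c)
          else s) s) ([], 0)).1)

-- ===== PORT B =====
-- B's scatter loops: for every seat with a preferred occupant, +1 on each in-range empty
-- neighbour's counter (Source B's first loop nest)
def pvAltCounts (maps : List (List Int)) (N : Int) (prefer : List (Int × Bool)) :
    PySem.Dict (Int × Int) Int :=
  (PySem.List.pyRange 0 N 1).foldl (fun d row =>
    (PySem.List.pyRange 0 N 1).foldl (fun d col =>
      if (PySem.Dict.mk prefer).getD (pvGet2 maps row col) false then
        (List.zip pvDR pvDC).foldl (fun d dd =>
          if (0 ≤ row + dd.1 ∧ row + dd.1 < N ∧ 0 ≤ col + dd.2 ∧ col + dd.2 < N) ∧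
              pvGet2 maps (row + dd.1) (col + dd.2) = 0 then
            d.modify (row + dd.1, col + dd.2) 0 (· + 1)
          else d) d
      else d) d) PySem.Dict.empty

-- Source B's `empties` comprehension: the empty seats in row-major order
def pvAltEmpties (maps : List (List Int)) (N : Int) : List (Int × Int) :=
  (PySem.List.pyRange 0 N 1).flatMap (fun row =>
    (PySem.List.pyRange 0 N 1).filterMap (fun col =>
      if pvGet2 maps row col = 0 then some (row, col) else none))

def find_seats_alt (maps : List (List Int)) (N : Int) (student : Int) (seats : List (Int × List (Int × Bool))) : List (Int × Int) :=
  let prefer := ((PySem.Dict.mk seats).get? student).getD []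
  let counts := pvAltCounts maps N prefer
  let empties := pvAltEmpties maps N
  let best := empties.foldl (fun b pos =>
    if counts.getD pos 0 > b then counts.getD pos 0 else b) 0
  empties.filter (fun pos => counts.getD pos 0 = best)

-- ===== PRECONDITION & SPEC =====
-- Pre_ excludes exactly the raising inputs: student missing from seats (KeyError) and grids
-- whose first N rows do not all exist with length ≥ N (IndexError).
def Pre_find_seats (maps : List (List Int)) (N : Int) (student : Int) (seats : List (Int × List (Int × Bool))) : Prop :=
  ((PySem.Dict.mk seats).get? student).isSome = true ∧
  N ≤ (maps.length : Int) ∧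
  ∀ row ∈ maps.take N.toNat, N ≤ (row.length : Int)
instance (maps : List (List Int)) (N : Int) (student : Int) (seats : List (Int × List (Int × Bool))) : Decidable (Pre_find_seats maps N student seats) := by unfold Pre_find_seats; infer_instance

def pvWitness_find_seats : List (List Int) × Int × Int × (List (Int × List (Int × Bool))) :=
  ([[0, 1], [2, 0]], 2, 1, [(1, [(2, true)])])

def Spec_find_seats (maps : List (List Int)) (N : Int) (student : Int) (seats : List (Int × List (Int × Bool))) (out : List (Int × Int)) : Prop := out = find_seats_alt maps N student seats
instance (maps : List (List Int)) (N : Int) (student : Int) (seats : List (Int × List (Int × Bool))) (out : List (Int × Int)) : Decidable (Spec_find_seats maps N student seats out) := by unfold Spec_find_seats; infer_instance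

-- ===== CLAIM (what is proved, stated in full; the proofs are below) =====
def Claim_equal_find_seats : Prop := ∀ (maps : List (List Int)) (N : Int) (student : Int) (seats : List (Int × List (Int × Bool))), Dom_find_seats maps N student seats → Pre_find_seats maps N student seats → Spec_find_seats maps N student seats (find_seats maps N student seats)

-- ===== LEMMAS AND PROOFS =====
def pvW (maps : List (List Int)) (prefer : List (Int × Bool)) (r c : Int) : ℕ :=
  if (PySem.Dict.mk prefer).getD (pvGet2 maps r c) false then 1 else 0

theorem pvInb_eq (x y N : Int) :
    is_in_boundary x y N = decide (0 ≤ x ∧ x < N ∧ 0 ≤ y ∧ y < N) := by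
  unfold is_in_boundary
  split_ifs with h1 h2 <;> simp_all

theorem pvSumPt (l : List Int) (hl : l.Nodup) (b col : Int) (v : Int → ℕ) :
    (l.map (fun c => if c + b = col then v c else 0)).sum
      = if col - b ∈ l then v (col - b) else 0 := by
  induction l with
  | nil => simp
  | cons x t ih =>
      have hx : x ∉ t := (List.nodup_cons.mp hl).1
      have ht := (List.nodup_cons.mp hl).2
      by_cases h : x + b = col
      · have hxe : x = col - b := by omega
        have hnt : col - b ∉ t := hxe ▸ hx
        have hz : (t.map (fun c => if c + b = col then v c else 0)).sum = 0 := by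
          rw [ih ht]; simp [hnt]
        subst hxe
        simp [h, hz]
      · have hne : col - b ≠ x := by omega
        simp [h, ih ht, List.mem_cons, hne]

theorem pvGridSum (N a b row col : Int) (w : Int → Int → ℕ) :
    ((PySem.List.pyRange 0 N 1).map (fun r =>
      ((PySem.List.pyRange 0 N 1).map (fun c =>
        if r + a = row ∧ c + b = col then w r c else 0)).sum)).sum
    = if 0 ≤ row - a ∧ row - a < N ∧ 0 ≤ col - b ∧ col - b < N then w (row - a) (col - b) else 0 := by
  have hn := PySem.List.nodup_pyRange_one 0 N
  have hinner : ∀ r : Int,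
      ((PySem.List.pyRange 0 N 1).map (fun c =>
        if r + a = row ∧ c + b = col then w r c else 0)).sum
      = if r + a = row then (if 0 ≤ col - b ∧ col - b < N then w r (col - b) else 0) else 0 := by
    intro r
    by_cases hr : r + a = row
    · have hf : (fun c => if r + a = row ∧ c + b = col then w r c else 0)
          = (fun c => if c + b = col then w r c else 0) := by
        funext c; rw [if_congr (and_iff_right hr) rfl rfl]
      rw [hf, pvSumPt _ hn b col (fun c => w r c)]
      simp [PySem.List.mem_pyRange_one, hr]
    · have hf : (fun c => if r + a = row ∧ c + b = col then w r c else 0)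
          = (fun _ => (0:ℕ)) := by funext c; simp [hr]
      rw [hf]; simp [hr]
  rw [List.map_congr_left (fun r _ => hinner r)]
  rw [pvSumPt _ hn a row (fun r => if 0 ≤ col - b ∧ col - b < N then w r (col - b) else 0)]
  simp only [PySem.List.mem_pyRange_one]
  split_ifs <;> first | rfl | omega

theorem pvFilterMapFlat {α β : Type} (ds : List α) (g : α → Option β) :
    ds.filterMap g = ds.flatMap (fun d => (g d).toList) := by
  induction ds with
  | nil => rfl
  | cons x t ih => cases h : g x <;> simp [h, ih]

theorem pvDirCount (maps : List (List Int)) (N : Int) (row col r c dr dc : Int)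
    (hb : 0 ≤ row ∧ row < N ∧ 0 ≤ col ∧ col < N) (he : pvGet2 maps row col = 0) :
    (Option.toList (if (0 ≤ r + dr ∧ r + dr < N ∧ 0 ≤ c + dc ∧ c + dc < N) ∧
        pvGet2 maps (r + dr) (c + dc) = 0 then some ((r + dr, c + dc) : Int × Int) else none)).count (row, col)
      = if r + dr = row ∧ c + dc = col then 1 else 0 := by
  by_cases ht : r + dr = row ∧ c + dc = col
  · obtain ⟨h1, h2⟩ := ht
    rw [h1, h2, if_pos ⟨⟨hb.1, hb.2.1, hb.2.2.1, hb.2.2.2⟩, he⟩]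
    simp
  · rw [if_neg ht]
    split_ifs with hc
    · have hne : ((r + dr, c + dc) : Int × Int) ≠ (row, col) := by
        intro hEq
        exact ht ⟨congrArg Prod.fst hEq, congrArg Prod.snd hEq⟩
      simp [hne]
    · simp

theorem pvCellCount (maps : List (List Int)) (N : Int) (prefer : List (Int × Bool))
    (row col r c : Int)
    (hb : 0 ≤ row ∧ row < N ∧ 0 ≤ col ∧ col < N) (he : pvGet2 maps row col = 0) :
    (List.count ((row, col) : Int × Int)
      (if (PySem.Dict.mk prefer).getD (pvGet2 maps r c) false then
        (List.zip pvDR pvDC).filterMap (fun dd =>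
          if (0 ≤ r + dd.1 ∧ r + dd.1 < N ∧ 0 ≤ c + dd.2 ∧ c + dd.2 < N) ∧
              pvGet2 maps (r + dd.1) (c + dd.2) = 0 then
            some (r + dd.1, c + dd.2)
          else none)
      else []))
    = (if r + -1 = row ∧ c + 0 = col then pvW maps prefer r c else 0)
      + (if r + 1 = row ∧ c + 0 = col then pvW maps prefer r c else 0)
      + (if r + 0 = row ∧ c + -1 = col then pvW maps prefer r c else 0)
      + (if r + 0 = row ∧ c + 1 = col then pvW maps prefer r c else 0) := by
  by_cases hp : (PySem.Dict.mk prefer).getD (pvGet2 maps r c) false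
  · rw [if_pos hp]
    have hz : List.zip pvDR pvDC = [((-1:ℤ),(0:ℤ)),(1,0),(0,-1),(0,1)] := rfl
    rw [hz, pvFilterMapFlat, List.count_flatMap]
    simp only [List.map_cons, List.map_nil, List.sum_cons, List.sum_nil, Function.comp]
    rw [pvDirCount maps N row col r c (-1) 0 hb he, pvDirCount maps N row col r c 1 0 hb he,
        pvDirCount maps N row col r c 0 (-1) hb he, pvDirCount maps N row col r c 0 1 hb he]
    simp only [pvW, hp, if_true]
    omega
  · rw [if_neg hp]
    simp [pvW, hp]

def pvScat (maps : List (List Int)) (N : Int) (prefer : List (Int × Bool)) : List (Int × Int) :=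
  (PySem.List.pyRange 0 N 1).flatMap (fun row =>
    (PySem.List.pyRange 0 N 1).flatMap (fun col =>
      if (PySem.Dict.mk prefer).getD (pvGet2 maps row col) false then
        (List.zip pvDR pvDC).filterMap (fun dd =>
          if (0 ≤ row + dd.1 ∧ row + dd.1 < N ∧ 0 ≤ col + dd.2 ∧ col + dd.2 < N) ∧
              pvGet2 maps (row + dd.1) (col + dd.2) = 0 then
            some (row + dd.1, col + dd.2)
          else none)
      else []))

set_option maxHeartbeats 1000000 in
theorem pvScatCount (maps : List (List Int)) (N : Int) (prefer : List (Int × Bool))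
    (row col : Int) (hb : 0 ≤ row ∧ row < N ∧ 0 ≤ col ∧ col < N)
    (he : pvGet2 maps row col = 0) :
    ((pvScat maps N prefer).count (row, col) : ℤ) = pvCount maps N prefer row col := by
  have e1 : (pvScat maps N prefer).count (row, col)
      = ((PySem.List.pyRange 0 N 1).map (fun r =>
          ((PySem.List.pyRange 0 N 1).map (fun c =>
            (if r + -1 = row ∧ c + 0 = col then pvW maps prefer r c else 0)
            + (if r + 1 = row ∧ c + 0 = col then pvW maps prefer r c else 0)
            + (if r + 0 = row ∧ c + -1 = col then pvW maps prefer r c else 0)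
            + (if r + 0 = row ∧ c + 1 = col then pvW maps prefer r c else 0))).sum)).sum := by
    unfold pvScat
    rw [List.count_flatMap]
    refine congrArg List.sum (List.map_congr_left (fun r _ => ?_))
    simp only [Function.comp]
    rw [List.count_flatMap]
    refine congrArg List.sum (List.map_congr_left (fun c _ => ?_))
    simp only [Function.comp]
    exact pvCellCount maps N prefer row col r c hb he
  rw [e1]
  simp only [List.sum_map_add]
  rw [pvGridSum N (-1) 0 row col (fun r c => pvW maps prefer r c),
      pvGridSum N 1 0 row col (fun r c => pvW maps prefer r c),
      pvGridSum N 0 (-1) row col (fun r c => pvW maps prefer r c),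
      pvGridSum N 0 1 row col (fun r c => pvW maps prefer r c)]
  have hmerge : ∀ (x y : Int),
      (if 0 ≤ x ∧ x < N ∧ 0 ≤ y ∧ y < N then pvW maps prefer x y else 0)
      = if (0 ≤ x ∧ x < N ∧ 0 ≤ y ∧ y < N) ∧
            (PySem.Dict.mk prefer).getD (pvGet2 maps x y) false = true then 1 else 0 := by
    intro x y; unfold pvW; split_ifs <;> simp_all
  rw [hmerge, hmerge, hmerge, hmerge]
  have hstep : ∀ (cnt x y : Int),
      (if is_in_boundary x y N then
        (if (PySem.Dict.mk prefer).getD (pvGet2 maps x y) false then cnt + 1 else cnt)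
      else cnt)
      = cnt + (if (0 ≤ x ∧ x < N ∧ 0 ≤ y ∧ y < N) ∧
            (PySem.Dict.mk prefer).getD (pvGet2 maps x y) false = true then 1 else 0) := by
    intro cnt x y; rw [pvInb_eq]; split_ifs <;> simp_all
  have hz : List.zip pvDR pvDC = [((-1:ℤ),(0:ℤ)),(1,0),(0,-1),(0,1)] := rfl
  simp only [pvCount, hz, List.foldl_cons, List.foldl_nil]
  simp only [hstep]
  push_cast
  simp only [add_zero, sub_zero, sub_neg_eq_add, ← sub_eq_add_neg]
  ring

-- ---------- A side: the running-max scan characterised as filter-by-max ----------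

def pvStep (s : List (Int × Int) × Int) (x : (Int × Int) × Int) : List (Int × Int) × Int :=
  if s.2 = x.2 then (s.1 ++ [x.1], s.2)
  else if s.2 < x.2 then ([x.1], x.2)
  else s

def pvMax (t : List ((Int × Int) × Int)) (m : Int) : Int :=
  t.foldl (fun a x => max a x.2) m

theorem pvLeMax : ∀ (t : List ((Int × Int) × Int)) (m : Int), m ≤ pvMax t m := by
  intro t
  induction t with
  | nil => intro m; simp [pvMax]
  | cons x t ih =>
      intro m
      have h := ih (max m x.2)
      simp only [pvMax, List.foldl_cons] at h ⊢
      omega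

theorem pvFoldlSkip {α β σ : Type} (xs : List α) (p : α → Prop) [DecidablePred p]
    (g : α → β) (step : σ → β → σ) (init : σ) :
    xs.foldl (fun s x => if p x then s else step s (g x)) init
      = (xs.filterMap (fun x => if p x then none else some (g x))).foldl step init := by
  induction xs generalizing init with
  | nil => rfl
  | cons a t ih => by_cases h : p a <;> simp [h, ih]

theorem pvFoldlKeep {α β σ : Type} (xs : List α) (p : α → Prop) [DecidablePred p]
    (g : α → β) (step : σ → β → σ) (init : σ) :
    xs.foldl (fun s x => if p x then step s (g x) else s) init
      = (xs.filterMap (fun x => if p x then some (g x) else none)).foldl step init := by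
  induction xs generalizing init with
  | nil => rfl
  | cons a t ih => by_cases h : p a <;> simp [h, ih]

theorem pvFoldlFlatMap {α β σ : Type} (xs : List α) (f : α → List β)
    (step : σ → β → σ) (init : σ) :
    xs.foldl (fun s x => (f x).foldl step s) init = (xs.flatMap f).foldl step init := by
  induction xs generalizing init with
  | nil => rfl
  | cons a t ih => simp [List.foldl_append, ih]

theorem pvFlatMapCongr {α β : Type} (l : List α) (f g : α → List β)
    (h : ∀ x ∈ l, f x = g x) : l.flatMap f = l.flatMap g := by
  induction l with
  | nil => rfl
  | cons a t ih =>
      simp only [List.flatMap_cons, h a (List.mem_cons_self ..),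
        ih (fun x hx => h x (List.mem_cons_of_mem _ hx))]

theorem pvRun : ∀ (t : List ((Int × Int) × Int)) (l : List (Int × Int)) (m : Int),
    t.foldl pvStep (l, m)
      = ((if pvMax t m = m then l else []) ++
          (t.filter (fun x => x.2 = pvMax t m)).map Prod.fst, pvMax t m) := by
  intro t
  induction t with
  | nil => intro l m; simp [pvMax]
  | cons x t ih =>
      intro l m
      have hM : pvMax (x :: t) m = pvMax t (max m x.2) := rfl
      rcases lt_trichotomy m x.2 with h | h | h
      · have hmx : max m x.2 = x.2 := by omega
        have hle := pvLeMax t x.2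
        have hs : pvStep (l, m) x = ([x.1], x.2) := by
          unfold pvStep; split_ifs <;> first | rfl | omega
        rw [List.foldl_cons, hs, ih, hM, hmx]
        rw [if_neg (by omega : ¬ pvMax t x.2 = m), List.filter_cons]
        by_cases hx : x.2 = pvMax t x.2
        · simp only [hx.symm]; simp
        · have hx' : ¬ pvMax t x.2 = x.2 := fun hh => hx hh.symm
          simp [hx, hx']
      · have hmx : max m x.2 = m := by omega
        have hs : pvStep (l, m) x = (l ++ [x.1], m) := by
          unfold pvStep; rw [if_pos (show (l, m).2 = x.2 from h)]
        have hle := pvLeMax t m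
        rw [List.foldl_cons, hs, ih, hM, hmx, List.filter_cons]
        by_cases hm : pvMax t m = m
        · have hcond : x.2 = pvMax t m := by omega
          simp [hm, hcond]
        · have hcond : ¬ x.2 = pvMax t m := by omega
          simp [hm, hcond]
      · have hmx : max m x.2 = m := by omega
        have hs : pvStep (l, m) x = (l, m) := by
          unfold pvStep; split_ifs <;> first | rfl | omega
        have hle := pvLeMax t m
        rw [List.foldl_cons, hs, ih, hM, hmx, List.filter_cons]
        have hcond : ¬ x.2 = pvMax t m := by omega
        simp [hcond]

-- the table of (empty seat, its count), named for the proofs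
def pvTable (maps : List (List Int)) (N : Int) (prefer : List (Int × Bool)) :
    List ((Int × Int) × Int) :=
  (PySem.List.pyRange 0 N 1).flatMap (fun row =>
    (PySem.List.pyRange 0 N 1).filterMap (fun col =>
      if pvGet2 maps row col ≠ 0 then none
      else some ((row, col), pvCount maps N prefer row col)))

-- A's scan equals "filter pvTable by its max count, take positions"
theorem pvMainA (maps : List (List Int)) (N : Int) (prefer : List (Int × Bool)) :
    (((PySem.List.pyRange 0 N 1).foldl (fun (s : List (Int × Int) × Int) row =>
        (PySem.List.pyRange 0 N 1).foldl (fun (s : List (Int × Int) × Int) col =>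
          if pvGet2 maps row col ≠ 0 then s
          else
            let c := pvCount maps N prefer row col
            if s.2 = c then (s.1 ++ [(row, col)], s.2)
            else if s.2 < c then ([(row, col)], c)
            else s) s) ([], 0)).1)
      = ((pvTable maps N prefer).filter
          (fun x => x.2 = pvMax (pvTable maps N prefer) 0)).map Prod.fst := by
  have hfun : (fun (s : List (Int × Int) × Int) (row : Int) =>
      (PySem.List.pyRange 0 N 1).foldl (fun (s : List (Int × Int) × Int) col =>
        if pvGet2 maps row col ≠ 0 then s
        else
          let c := pvCount maps N prefer row col
          if s.2 = c then (s.1 ++ [(row, col)], s.2)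
          else if s.2 < c then ([(row, col)], c)
          else s) s)
      = (fun (s : List (Int × Int) × Int) (row : Int) =>
          ((PySem.List.pyRange 0 N 1).filterMap (fun col =>
            if pvGet2 maps row col ≠ 0 then none
            else some ((row, col), pvCount maps N prefer row col))).foldl pvStep s) := by
    funext s row
    exact pvFoldlSkip (PySem.List.pyRange 0 N 1) (fun col => pvGet2 maps row col ≠ 0)
      (fun col => ((row, col), pvCount maps N prefer row col)) pvStep s
  rw [hfun, pvFoldlFlatMap]
  rw [show ((PySem.List.pyRange 0 N 1).flatMap (fun row =>
      (PySem.List.pyRange 0 N 1).filterMap (fun col =>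
        if pvGet2 maps row col ≠ 0 then none
        else some ((row, col), pvCount maps N prefer row col)))) = pvTable maps N prefer from rfl]
  rw [pvRun]
  simp

-- ---------- B side: the counter dict is the modify-fold over the scatter list ----------

theorem pvCountsEq (maps : List (List Int)) (N : Int) (prefer : List (Int × Bool)) :
    pvAltCounts maps N prefer
      = (pvScat maps N prefer).foldl (fun d x => d.modify x 0 (· + 1)) PySem.Dict.empty := by
  unfold pvAltCounts pvScat
  rw [← pvFoldlFlatMap]
  refine PySem.List.foldl_congr_mem _ _ _ _ (fun d row _ => ?_)
  rw [← pvFoldlFlatMap]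
  refine PySem.List.foldl_congr_mem _ _ _ _ (fun d2 col _ => ?_)
  by_cases hp : (PySem.Dict.mk prefer).getD (pvGet2 maps row col) false
  · rw [if_pos hp, if_pos hp]
    exact pvFoldlKeep (List.zip pvDR pvDC)
      (fun dd => (0 ≤ row + dd.1 ∧ row + dd.1 < N ∧ 0 ≤ col + dd.2 ∧ col + dd.2 < N) ∧
        pvGet2 maps (row + dd.1) (col + dd.2) = 0)
      (fun dd => (row + dd.1, col + dd.2)) (fun d x => d.modify x 0 (· + 1)) d2
  · rw [if_neg hp, if_neg hp]; rfl

-- ---------- assembly ----------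

theorem pvMainB (maps : List (List Int)) (N : Int) (prefer : List (Int × Bool)) :
    ((pvAltEmpties maps N).filter (fun pos =>
      (pvAltCounts maps N prefer).getD pos 0 =
        (pvAltEmpties maps N).foldl (fun b pos =>
          if (pvAltCounts maps N prefer).getD pos 0 > b then
            (pvAltCounts maps N prefer).getD pos 0 else b) 0))
    = ((pvTable maps N prefer).filter
        (fun x => x.2 = pvMax (pvTable maps N prefer) 0)).map Prod.fst := by
  have hmemE : ∀ p ∈ pvAltEmpties maps N,
      (0 ≤ p.1 ∧ p.1 < N ∧ 0 ≤ p.2 ∧ p.2 < N) ∧ pvGet2 maps p.1 p.2 = 0 := by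
    intro p hp
    unfold pvAltEmpties at hp
    rw [List.mem_flatMap] at hp
    obtain ⟨r, hr, hp2⟩ := hp
    rw [List.mem_filterMap] at hp2
    obtain ⟨c, hc, hp3⟩ := hp2
    rw [PySem.List.mem_pyRange_one] at hr hc
    by_cases hg : pvGet2 maps r c = 0
    · rw [if_pos hg] at hp3
      cases hp3
      exact ⟨⟨hr.1, hr.2, hc.1, hc.2⟩, hg⟩
    · rw [if_neg hg] at hp3
      cases hp3
  have hpt : ∀ p ∈ pvAltEmpties maps N,
      (pvAltCounts maps N prefer).getD p 0 = pvCount maps N prefer p.1 p.2 := by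
    intro p hp
    obtain ⟨hb, he⟩ := hmemE p hp
    rw [pvCountsEq, PySem.Dict.getD_foldl_modify_add_one]
    rw [PySem.Dict.getD_empty]
    have h := pvScatCount maps N prefer p.1 p.2 hb he
    simpa using h
  have hE : pvTable maps N prefer
      = (pvAltEmpties maps N).map (fun p => (p, pvCount maps N prefer p.1 p.2)) := by
    unfold pvTable pvAltEmpties
    rw [List.map_flatMap]
    refine pvFlatMapCongr _ _ _ (fun r _ => ?_)
    rw [List.map_filterMap]
    have hf : (fun col => Option.map (fun p => (p, pvCount maps N prefer p.1 p.2))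
        (if pvGet2 maps r col = 0 then some (r, col) else none))
        = (fun col => if pvGet2 maps r col ≠ 0 then none
            else some ((r, col), pvCount maps N prefer r col)) := by
      funext col
      by_cases hg : pvGet2 maps r col = 0 <;> simp [hg]
    rw [hf]
  have hbest : (pvAltEmpties maps N).foldl (fun b pos =>
      if (pvAltCounts maps N prefer).getD pos 0 > b then
        (pvAltCounts maps N prefer).getD pos 0 else b) 0
      = pvMax (pvTable maps N prefer) 0 := by
    rw [hE]
    unfold pvMax
    rw [List.foldl_map]
    refine PySem.List.foldl_congr_mem _ _ _ _ (fun acc p hp => ?_)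
    rw [hpt p hp, max_def]
    split_ifs <;> omega
  rw [hE, List.filter_map, List.map_map]
  simp only [hbest]
  have hfilt : (pvAltEmpties maps N).filter (fun pos =>
        (pvAltCounts maps N prefer).getD pos 0 = pvMax (pvTable maps N prefer) 0)
      = (pvAltEmpties maps N).filter (fun pos =>
        pvCount maps N prefer pos.1 pos.2 = pvMax (pvTable maps N prefer) 0) :=
    List.filter_congr (fun p hp => by rw [hpt p hp])
  rw [hfilt, ← hE]
  simp only [Function.comp_def]
  simp

theorem pvA_eq (maps : List (List Int)) (N : Int) (student : Int)
    (seats : List (Int × List (Int × Bool))) :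
    find_seats maps N student seats
      = ((pvTable maps N (((PySem.Dict.mk seats).get? student).getD [])).filter
          (fun x => x.2 = pvMax (pvTable maps N (((PySem.Dict.mk seats).get? student).getD [])) 0)).map Prod.fst := by
  unfold find_seats
  exact pvMainA maps N (((PySem.Dict.mk seats).get? student).getD [])

theorem pvB_eq (maps : List (List Int)) (N : Int) (student : Int)
    (seats : List (Int × List (Int × Bool))) :
    find_seats_alt maps N student seats
      = ((pvTable maps N (((PySem.Dict.mk seats).get? student).getD [])).filter
          (fun x => x.2 = pvMax (pvTable maps N (((PySem.Dict.mk seats).get? student).getD [])) 0)).map Prod.fst := by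
  unfold find_seats_alt
  exact pvMainB maps N (((PySem.Dict.mk seats).get? student).getD [])

-- ===== VERDICT (by name: the statement is the Claim_ definition above) =====
theorem find_seats_spec : Claim_equal_find_seats := by
  intro maps N student seats _hdom _hpre
  unfold Spec_find_seats
  rw [pvA_eq, pvB_eq]
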